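-- pv_equiv track=rewrite | github.com/rtnapps/Scan_Data_Creation | Scan_Data_Collection/V1/routes/gilbarco_circana_scan.py | remove_duplicates_based_on_date
-- ===== SOURCE A (Python) =====
-- def remove_duplicates_based_on_date(data):
--     seen_dates = set()
--     unique_data = []
--     duplicates_count = 0
--     removed_zero_price_count = 0
--     for obj in data:
--         transaction_date = obj["Transaction Date/Time"]
--         price = obj["Price"]
--         if price == "0" or price == "0.00":
--             removed_zero_price_count += 1
--             continue
--         if transaction_date in seen_dates:
--             duplicates_count += 1
--         else:
--             seen_dates.add(transaction_date)
--             unique_data.append(obj)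
--     return unique_data, duplicates_count, removed_zero_price_count
-- ===== SOURCE B (Python) =====
-- def remove_duplicates_based_on_date(data):
--     filtered = [obj for obj in data if obj["Price"] not in ("0", "0.00")]
--     removed_zero_price_count = len(data) - len(filtered)
--     seen_dates = set()
--     unique_data = []
--     duplicates_count = 0
--     for obj in filtered:
--         date = obj["Transaction Date/Time"]
--         if date in seen_dates:
--             duplicates_count += 1
--         else:
--             seen_dates.add(date)
--             unique_data.append(obj)
--     return unique_data, duplicates_count, removed_zero_price_count
-- ===== Notes on version B (the rewrite author's own statement) =====
-- stated objective: alternative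
-- what changed: Single fused loop with four accumulators replaced by two sequential passes: a filter pass dropping zero-price rows (removed count obtained by length arithmetic) followed by a dedupe-by-date pass.
import Mathlib
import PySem

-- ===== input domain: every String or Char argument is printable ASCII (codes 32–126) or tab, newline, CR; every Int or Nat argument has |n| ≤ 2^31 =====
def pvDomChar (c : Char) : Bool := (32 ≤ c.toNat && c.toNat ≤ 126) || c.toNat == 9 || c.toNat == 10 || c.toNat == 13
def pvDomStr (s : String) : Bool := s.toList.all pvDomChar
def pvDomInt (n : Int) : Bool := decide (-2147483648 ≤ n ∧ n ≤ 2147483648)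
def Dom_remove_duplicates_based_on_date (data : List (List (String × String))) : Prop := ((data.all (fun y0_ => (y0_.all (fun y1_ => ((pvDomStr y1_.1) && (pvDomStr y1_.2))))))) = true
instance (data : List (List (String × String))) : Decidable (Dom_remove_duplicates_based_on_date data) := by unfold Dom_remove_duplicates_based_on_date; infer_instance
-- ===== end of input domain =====

-- B replaces A's single fused loop (four accumulators) by two sequential passes: filter out
-- zero-price rows (removed count by length arithmetic), then dedupe by date; same cost, different decomposition.

-- obj["k"]: first-match association-list lookup (Python dict access; none = KeyError)
def rddLookup (obj : List (String × String)) (k : String) : Option String :=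
  PySem.Dict.get? (PySem.Dict.mk obj) k

-- ===== PORT A =====
-- the single loop of A, carrying (seen_dates, unique_data, duplicates_count, removed_zero_price_count)
def rddLoopA : List (List (String × String)) → PySem.Set String → List (List (String × String)) → Int → Int → (List (List (String × String))) × Int × Int
  | [], _, uniq, dup, zero => (uniq, dup, zero)
  | obj :: rest, seen, uniq, dup, zero =>
    match rddLookup obj "Transaction Date/Time", rddLookup obj "Price" with
    | some td, some price =>
      if price == "0" || price == "0.00" then
        rddLoopA rest seen uniq dup (zero + 1)
      else if PySem.Set.contains seen td then
        rddLoopA rest seen uniq (dup + 1) zero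
      else
        rddLoopA rest (PySem.Set.add seen td) (uniq ++ [obj]) dup zero
    | _, _ => rddLoopA rest seen uniq dup zero  -- KeyError in Python; excluded by Pre_

def remove_duplicates_based_on_date (data : List (List (String × String))) : (List (List (String × String))) × Int × Int :=
  rddLoopA data PySem.Set.empty [] 0 0

-- ===== PORT B =====
-- pass 1 predicate: keep rows whose Price is not "0"/"0.00"
def rddKeep (obj : List (String × String)) : Bool :=
  match rddLookup obj "Price" with
  | some price => !(price == "0" || price == "0.00")
  | none => false  -- KeyError in Python; excluded by Pre_

-- pass 2: dedupe by date, carrying (seen_dates, unique_data, duplicates_count)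
def rddLoopB : List (List (String × String)) → PySem.Set String → List (List (String × String)) → Int → (List (List (String × String))) × Int
  | [], _, uniq, dup => (uniq, dup)
  | obj :: rest, seen, uniq, dup =>
    match rddLookup obj "Transaction Date/Time" with
    | some date =>
      if PySem.Set.contains seen date then
        rddLoopB rest seen uniq (dup + 1)
      else
        rddLoopB rest (PySem.Set.add seen date) (uniq ++ [obj]) dup
    | none => rddLoopB rest seen uniq dup  -- KeyError in Python; excluded by Pre_

def remove_duplicates_based_on_date_alt (data : List (List (String × String))) : (List (List (String × String))) × Int × Int :=
  let filtered := data.filter rddKeep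
  let p := rddLoopB filtered PySem.Set.empty [] 0
  (p.1, p.2, (data.length : Int) - (filtered.length : Int))

-- ===== PRECONDITION & SPEC =====
-- Pre_ excludes exactly the inputs on which Python A raises KeyError: a row missing
-- "Transaction Date/Time" or "Price" (A reads both keys of every row).
def Pre_remove_duplicates_based_on_date (data : List (List (String × String))) : Prop :=
  ∀ obj ∈ data, (rddLookup obj "Transaction Date/Time").isSome ∧ (rddLookup obj "Price").isSome
instance (data : List (List (String × String))) : Decidable (Pre_remove_duplicates_based_on_date data) := by unfold Pre_remove_duplicates_based_on_date; infer_instance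

def pvWitness_remove_duplicates_based_on_date : (List (List (String × String))) :=
  [[("Transaction Date/Time", "2024-01-01 10:00"), ("Price", "1.50")],
   [("Transaction Date/Time", "2024-01-01 10:00"), ("Price", "2.00")],
   [("Transaction Date/Time", "2024-01-02 09:00"), ("Price", "0")]]

def Spec_remove_duplicates_based_on_date (data : List (List (String × String))) (out : (List (List (String × String))) × Int × Int) : Prop := out = remove_duplicates_based_on_date_alt data
instance (data : List (List (String × String))) (out : (List (List (String × String))) × Int × Int) : Decidable (Spec_remove_duplicates_based_on_date data out) := by unfold Spec_remove_duplicates_based_on_date; infer_instance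

-- ===== CLAIM (what is proved, stated in full; the proofs are below) =====
def Claim_equal_remove_duplicates_based_on_date : Prop := ∀ (data : List (List (String × String))), Dom_remove_duplicates_based_on_date data → Pre_remove_duplicates_based_on_date data → Spec_remove_duplicates_based_on_date data (remove_duplicates_based_on_date data)

-- ===== LEMMAS AND PROOFS =====

-- A's fused loop equals B's dedupe pass on the filtered list, with the removed count recovered
-- from the two lengths.
theorem rddLoop_eq (l : List (List (String × String))) :
    ∀ (seen : PySem.Set String) (uniq : List (List (String × String))) (dup zero : Int),
    (∀ obj ∈ l, (rddLookup obj "Transaction Date/Time").isSome ∧ (rddLookup obj "Price").isSome) →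
    rddLoopA l seen uniq dup zero =
      ((rddLoopB (l.filter rddKeep) seen uniq dup).1,
       (rddLoopB (l.filter rddKeep) seen uniq dup).2,
       zero + ((l.length : Int) - ((l.filter rddKeep).length : Int))) := by
  induction l with
  | nil => intro seen uniq dup zero _; simp [rddLoopA, rddLoopB]
  | cons obj rest ih =>
    intro seen uniq dup zero h
    have htd := (h obj (List.mem_cons_self ..)).1
    have hpr := (h obj (List.mem_cons_self ..)).2
    have hrest : ∀ o ∈ rest, (rddLookup o "Transaction Date/Time").isSome ∧ (rddLookup o "Price").isSome :=
      fun o ho => h o (List.mem_cons_of_mem _ ho)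
    obtain ⟨td, htd⟩ := Option.isSome_iff_exists.mp htd
    obtain ⟨price, hpr⟩ := Option.isSome_iff_exists.mp hpr
    by_cases hz : (price == "0" || price == "0.00") = true
    · have hk : rddKeep obj = false := by simp [rddKeep, hpr, hz]
      have h1 : rddLoopA (obj :: rest) seen uniq dup zero = rddLoopA rest seen uniq dup (zero + 1) := by
        simp [rddLoopA, htd, hpr, hz]
      rw [h1, List.filter_cons_of_neg (by simp [hk]), ih seen uniq dup (zero + 1) hrest]
      simp only [Prod.mk.injEq, List.length_cons]
      exact ⟨by trivial, by trivial, by push_cast; omega⟩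
    · have hk : rddKeep obj = true := by simp [rddKeep, hpr, hz]
      rw [List.filter_cons_of_pos hk]
      by_cases hc : td ∈ seen
      · have h1 : rddLoopA (obj :: rest) seen uniq dup zero = rddLoopA rest seen uniq (dup + 1) zero := by
          simp [rddLoopA, htd, hpr, hz, hc]
        have h2 : rddLoopB (obj :: List.filter rddKeep rest) seen uniq dup = rddLoopB (List.filter rddKeep rest) seen uniq (dup + 1) := by
          simp [rddLoopB, htd, hc]
        rw [h1, h2, ih seen uniq (dup + 1) zero hrest]
        simp only [Prod.mk.injEq, List.length_cons]
        exact ⟨by trivial, by trivial, by push_cast; omega⟩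
      · have h1 : rddLoopA (obj :: rest) seen uniq dup zero = rddLoopA rest (PySem.Set.add seen td) (uniq ++ [obj]) dup zero := by
          simp [rddLoopA, htd, hpr, hz, hc]
        have h2 : rddLoopB (obj :: List.filter rddKeep rest) seen uniq dup = rddLoopB (List.filter rddKeep rest) (PySem.Set.add seen td) (uniq ++ [obj]) dup := by
          simp [rddLoopB, htd, hc]
        rw [h1, h2, ih (PySem.Set.add seen td) (uniq ++ [obj]) dup zero hrest]
        simp only [Prod.mk.injEq, List.length_cons]
        exact ⟨by trivial, by trivial, by push_cast; omega⟩

-- ===== VERDICT (by name: the statement is the Claim_ definition above) =====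
theorem remove_duplicates_based_on_date_spec : Claim_equal_remove_duplicates_based_on_date := by
  intro data _ hpre
  unfold Spec_remove_duplicates_based_on_date remove_duplicates_based_on_date remove_duplicates_based_on_date_alt
  rw [rddLoop_eq data PySem.Set.empty [] 0 0 hpre]
  simp
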